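-- pv_equiv track=rewrite | github.com/MGBid/python_total | Dia-5/ejercicio_codificacion_97.py | todos_positivos
-- ===== SOURCE A (Python) =====
-- def todos_positivos(lista):
--     lista_auxiliar = []
--     for numero in lista:
--         if numero > 0:
--             lista_auxiliar.append(numero)
--         else:
--             pass
--     return lista == lista_auxiliar
-- ===== SOURCE B (Python) =====
-- def todos_positivos(lista):
--     if not lista:
--         return True
--     return min(lista) > 0
-- ===== Notes on version B (the rewrite author's own statement) =====
-- stated objective: simpler
-- what changed: B replaces A's build-a-filtered-copy-and-compare-lists with an empty-list guard plus a single min aggregate compared to zero.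
import Mathlib
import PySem

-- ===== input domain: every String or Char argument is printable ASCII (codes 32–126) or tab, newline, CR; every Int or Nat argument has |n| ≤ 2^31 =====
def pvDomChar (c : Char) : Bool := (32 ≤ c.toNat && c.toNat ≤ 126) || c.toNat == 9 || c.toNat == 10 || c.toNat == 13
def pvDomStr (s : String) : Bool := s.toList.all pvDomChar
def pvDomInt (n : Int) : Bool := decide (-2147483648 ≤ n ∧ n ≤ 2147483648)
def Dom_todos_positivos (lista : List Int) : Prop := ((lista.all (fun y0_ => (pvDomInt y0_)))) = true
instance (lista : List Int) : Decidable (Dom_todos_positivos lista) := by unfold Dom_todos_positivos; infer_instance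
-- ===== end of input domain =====

-- ===== PORT A =====
def todos_positivos (lista : List Int) : Bool :=
  let lista_auxiliar := lista.foldl (fun acc numero => if numero > 0 then acc ++ [numero] else acc) []
  lista == lista_auxiliar

-- ===== PORT B =====
-- B: empty list -> true, else compare the min aggregate with zero
def todos_positivos_alt (lista : List Int) : Bool :=
  match lista with
  | [] => true
  | x :: xs => decide (xs.foldl min x > 0)

-- ===== PRECONDITION & SPEC =====
def Spec_todos_positivos (lista : List Int) (out : Bool) : Prop := out = todos_positivos_alt lista
instance (lista : List Int) (out : Bool) : Decidable (Spec_todos_positivos lista out) := by unfold Spec_todos_positivos; infer_instance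

-- ===== CLAIM (what is proved, stated in full; the proofs are below) =====
def Claim_equal_todos_positivos : Prop := ∀ (lista : List Int), Dom_todos_positivos lista → Spec_todos_positivos lista (todos_positivos lista)

-- ===== LEMMAS AND PROOFS =====

-- ===== VERDICT (by name: the statement is the Claim_ definition above) =====
theorem aux_foldl (l : List Int) (acc : List Int) :
    l.foldl (fun acc numero => if numero > 0 then acc ++ [numero] else acc) acc
      = acc ++ l.filter (fun n => decide (n > 0)) := by
  induction l generalizing acc with
  | nil => simp
  | cons x xs ih =>
    by_cases h : x > 0 <;> simp [List.foldl, h, ih, List.filter]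

theorem min_pos (x : Int) (xs : List Int) :
    (xs.foldl min x > 0) ↔ (x > 0 ∧ ∀ y ∈ xs, y > 0) := by
  induction xs generalizing x with
  | nil => simp
  | cons y ys ih =>
    simp only [List.foldl, ih, List.mem_cons]
    constructor
    · rintro ⟨h1, h2⟩
      refine ⟨lt_of_lt_of_le h1 (min_le_left _ _), fun z hz => ?_⟩
      rcases hz with rfl | hz
      · exact lt_of_lt_of_le h1 (min_le_right _ _)
      · exact h2 z hz
    · rintro ⟨h1, h2⟩
      exact ⟨lt_min h1 (h2 y (Or.inl rfl)), fun z hz => h2 z (Or.inr hz)⟩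

theorem filter_eq_self (l : List Int) :
    (l = l.filter (fun n => decide (n > 0))) ↔ ∀ y ∈ l, y > 0 := by
  constructor
  · intro h y hy
    have := List.of_mem_filter (a := y) (l := l) (by rw [← h]; exact hy)
    simpa using this
  · intro h
    exact (List.filter_eq_self.mpr (fun a ha => by simpa using h a ha)).symm

theorem todos_positivos_spec : Claim_equal_todos_positivos := by
  intro lista _
  unfold Spec_todos_positivos todos_positivos todos_positivos_alt
  cases lista with
  | nil => simp
  | cons x xs =>
    simp only [aux_foldl, List.nil_append]
    rw [Bool.eq_iff_iff]
    simp only [beq_iff_eq, decide_eq_true_eq]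
    rw [filter_eq_self, min_pos]
    simp only [List.mem_cons]
    constructor
    · intro h; exact ⟨h x (Or.inl rfl), fun y hy => h y (Or.inr hy)⟩
    · rintro ⟨h1, h2⟩ y hy; rcases hy with rfl | hy; exact h1; exact h2 y hy
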